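-- pv_equiv track=rewrite | github.com/igor-holt/bOS-House | services/ingestion/celestial_body.py | _infer_primary_language
-- ===== SOURCE A (Python) =====
-- def _infer_primary_language(suffix_counts: dict[str, int]) -> str:
--     if not suffix_counts:
--         return "unknown"
--
--     non_source = {".md", ".txt", ".json", ".yaml", ".yml"}
--     candidates = {k: v for k, v in suffix_counts.items() if k not in non_source}
--     if not candidates:
--         candidates = suffix_counts
--
--     suffix = max(candidates.items(), key=lambda item: item[1])[0]
--     return suffix.lstrip(".") or "unknown"
-- ===== SOURCE B (Python) =====
-- def _infer_primary_language(suffix_counts: dict[str, int]) -> str: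
--     non_source = {".md", ".txt", ".json", ".yaml", ".yml"}
--     best_source_key = None
--     best_source_count = 0
--     best_any_key = None
--     best_any_count = 0
--     for k, v in suffix_counts.items():
--         if best_any_key is None or v > best_any_count:
--             best_any_key, best_any_count = k, v
--         if k not in non_source and (best_source_key is None or v > best_source_count):
--             best_source_key, best_source_count = k, v
--     chosen = best_source_key if best_source_key is not None else best_any_key
--     if chosen is None:
--         return "unknown"
--     return chosen.lstrip(".") or "unknown"
-- ===== Notes on version B (the rewrite author's own statement) =====
-- stated objective: alternative
-- what changed: Replaces A's build-a-filtered-dict-then-call-max two-pass structure with a single fused pass that maintains two running first-seen maxima (best non-source suffix and best overall suffix) and picks the fallback after the loop.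
import Mathlib
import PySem

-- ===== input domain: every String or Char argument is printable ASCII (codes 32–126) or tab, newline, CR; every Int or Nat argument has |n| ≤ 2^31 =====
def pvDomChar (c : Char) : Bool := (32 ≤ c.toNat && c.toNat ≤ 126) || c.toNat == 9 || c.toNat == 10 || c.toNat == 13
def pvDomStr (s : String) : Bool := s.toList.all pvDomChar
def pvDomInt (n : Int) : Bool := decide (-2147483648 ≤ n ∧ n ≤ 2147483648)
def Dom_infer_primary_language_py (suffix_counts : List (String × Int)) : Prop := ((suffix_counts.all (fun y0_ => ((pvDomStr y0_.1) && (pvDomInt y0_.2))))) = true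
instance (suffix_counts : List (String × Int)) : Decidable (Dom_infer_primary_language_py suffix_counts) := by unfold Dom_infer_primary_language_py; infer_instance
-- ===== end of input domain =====

-- B replaces A's dict-comprehension filter + max() with one fused pass keeping two running
-- first-seen maxima (best non-source entry, best overall entry); objective: alternative.

-- ===== PORT A =====
-- the non_source set literal of A
def nonSourceA : List String := [".md", ".txt", ".json", ".yaml", ".yml"]

-- s.lstrip(".") : drop leading '.' characters (exact: lstrip with an explicit char set is
-- dropWhile membership; here the set is the single character '.')
def lstripDot (s : String) : String := String.ofList (s.toList.dropWhile (fun c => c == '.'))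

def infer_primary_language_py (suffix_counts : List (String × Int)) : String :=
  if suffix_counts = [] then "unknown"
  else
    let candidates := suffix_counts.filter (fun kv => !(nonSourceA.contains kv.1))
    let cands := if candidates = [] then suffix_counts else candidates
    match PySem.List.max? cands (fun kv => kv.2) with
    | some m => let s := lstripDot m.1
                if s = "" then "unknown" else s
    | none => "unknown"   -- unreachable: cands is nonempty here

-- ===== PORT B =====
def nonSourceB : List String := [".md", ".txt", ".json", ".yaml", ".yml"]

def infer_primary_language_py_alt (suffix_counts : List (String × Int)) : String :=
  let st := suffix_counts.foldl
    (fun (acc : Option (String × Int) × Option (String × Int)) kv =>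
      let bs := if nonSourceB.contains kv.1 then acc.1
                else match acc.1 with
                     | none => some kv
                     | some m => if m.2 < kv.2 then some kv else some m
      let ba := match acc.2 with
                | none => some kv
                | some m => if m.2 < kv.2 then some kv else some m
      (bs, ba))
    (none, none)
  let chosen : Option String :=
    match st.1 with
    | some m => some m.1
    | none => match st.2 with
              | some m => some m.1
              | none => none
  match chosen with
  | none => "unknown"
  | some k => let s := String.ofList (k.toList.dropWhile (fun c => c == '.'))
              if s = "" then "unknown" else s

-- ===== PRECONDITION & SPEC =====
def Spec_infer_primary_language_py (suffix_counts : List (String × Int)) (out : String) : Prop := out = infer_primary_language_py_alt suffix_counts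
instance (suffix_counts : List (String × Int)) (out : String) : Decidable (Spec_infer_primary_language_py suffix_counts out) := by unfold Spec_infer_primary_language_py; infer_instance

-- ===== CLAIM (what is proved, stated in full; the proofs are below) =====
def Claim_equal_infer_primary_language_py : Prop := ∀ (suffix_counts : List (String × Int)), Dom_infer_primary_language_py suffix_counts → Spec_infer_primary_language_py suffix_counts (infer_primary_language_py suffix_counts)

-- ===== LEMMAS AND PROOFS =====

-- the running-max step of Python's max(key=...), first maximum kept
def maxStep (a : Option (String × Int)) (kv : String × Int) : Option (String × Int) :=
  match a with
  | none => some kv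
  | some m => if m.2 < kv.2 then some kv else some m

theorem pair_fold (xs : List (String × Int))
    (a b : Option (String × Int)) :
    xs.foldl (fun (acc : Option (String × Int) × Option (String × Int)) kv =>
        (if nonSourceB.contains kv.1 then acc.1 else maxStep acc.1 kv, maxStep acc.2 kv)) (a, b)
      = (xs.foldl (fun acc kv => if nonSourceB.contains kv.1 then acc else maxStep acc kv) a,
         xs.foldl maxStep b) := by
  induction xs generalizing a b with
  | nil => rfl
  | cons x t ih =>
    simp only [List.foldl_cons]
    exact ih _ _

theorem skip_fold (xs : List (String × Int)) (a : Option (String × Int)) :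
    xs.foldl (fun acc kv => if nonSourceB.contains kv.1 then acc else maxStep acc kv) a
      = (xs.filter (fun kv => !(nonSourceB.contains kv.1))).foldl maxStep a := by
  induction xs generalizing a with
  | nil => rfl
  | cons x t ih =>
    rw [List.foldl_cons, List.filter_cons]
    by_cases h : nonSourceB.contains x.1 = true
    · rw [if_pos h, if_neg (by simp; simpa using h), ih]
    · rw [if_neg h, if_pos (by simp at h ⊢; exact h), List.foldl_cons, ih]

theorem max?_eq_fold (xs : List (String × Int)) :
    PySem.List.max? xs (fun kv => kv.2) = xs.foldl maxStep none := by
  unfold PySem.List.max? maxStep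
  congr 1
  funext a x
  cases a <;> rfl

theorem foldl_maxStep_ne_none (xs : List (String × Int)) (m : String × Int) :
    xs.foldl maxStep (some m) ≠ none := by
  induction xs generalizing m with
  | nil => simp
  | cons x t ih =>
    by_cases h : m.2 < x.2 <;> simp [List.foldl_cons, maxStep, h, ih]

theorem infer_spec_aux (suffix_counts : List (String × Int)) :
    infer_primary_language_py suffix_counts = infer_primary_language_py_alt suffix_counts := by
  unfold infer_primary_language_py infer_primary_language_py_alt
  have hbody : (fun (acc : Option (String × Int) × Option (String × Int)) (kv : String × Int) =>
      (if nonSourceB.contains kv.1 then acc.1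
        else match acc.1 with
             | none => some kv
             | some m => if m.2 < kv.2 then some kv else some m,
       match acc.2 with
       | none => some kv
       | some m => if m.2 < kv.2 then some kv else some m))
      = (fun (acc : Option (String × Int) × Option (String × Int)) kv =>
          (if nonSourceB.contains kv.1 then acc.1 else maxStep acc.1 kv, maxStep acc.2 kv)) := by
    funext acc kv; simp [maxStep]
  rw [hbody, pair_fold suffix_counts none none, skip_fold]
  have hns : nonSourceB = nonSourceA := rfl
  rw [hns]
  dsimp only
  cases suffix_counts with
  | nil => rfl
  | cons y t =>
    rw [if_neg (List.cons_ne_nil y t)]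
    have hcons : (y :: t).foldl maxStep none = t.foldl maxStep (some y) := by
      simp [List.foldl_cons, maxStep]
    by_cases hc : (y :: t).filter (fun kv => !(nonSourceA.contains kv.1)) = []
    · rw [hc]
      simp only [List.foldl_nil, if_true]
      rw [max?_eq_fold, hcons]
      cases hfa : t.foldl maxStep (some y) with
      | none => exact absurd hfa (foldl_maxStep_ne_none t y)
      | some m => simp [lstripDot]
    · obtain ⟨z, u, hzu⟩ := List.exists_cons_of_ne_nil hc
      rw [if_neg hc, hzu, max?_eq_fold]
      have hcons2 : (z :: u).foldl maxStep none = u.foldl maxStep (some z) := by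
        simp [List.foldl_cons, maxStep]
      rw [hcons2]
      cases hfa : u.foldl maxStep (some z) with
      | none => exact absurd hfa (foldl_maxStep_ne_none u z)
      | some m => simp [lstripDot]

-- ===== VERDICT (by name: the statement is the Claim_ definition above) =====
theorem infer_primary_language_py_spec : Claim_equal_infer_primary_language_py := by
  intro sc _
  unfold Spec_infer_primary_language_py
  exact infer_spec_aux sc
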